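-- pv_equiv track=rewrite | github.com/kuhnia/Python | week_1/application.py | f11
-- ===== SOURCE A (Python) =====
-- def f11(s):
--     numericStr = []
--     numeric = []
--     prev = True
--     count = -1
--     for i in s:
--         if i.isdigit() and prev == True:
--             numericStr.append(i)
--             prev = False
--             count+=1
--         elif i.isdigit() and prev == False:
--             numericStr[count] += i
--         else:
--             prev = True
--     for i in numericStr:
--         num = int(i, 2)
--         if num % 5 == 0:
--             numeric.append(num)
--     return numeric
-- ===== SOURCE B (Python) =====
-- def f11(s):
--     # Phase 1: collect maximal runs of digit characters with an index scan
--     # (span per run) instead of a per-character prev/count state machine.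
--     n = len(s)
--     runs = []
--     i = 0
--     while i < n:
--         if s[i].isdigit():
--             j = i
--             while j < n and s[j].isdigit():
--                 j += 1
--             runs.append(s[i:j])
--             i = j
--         else:
--             i += 1
--     # Phase 2: convert every run from binary, keep multiples of 5.
--     nums = [int(r, 2) for r in runs]
--     return [m for m in nums if m % 5 == 0]
-- ===== Notes on version B (the rewrite author's own statement) =====
-- stated objective: simpler
-- what changed: Replaces A's per-character prev/count state machine (which mutates the last collected string through an index) by an index scan that slices out each maximal digit run in one span, then converts and filters in comprehensions.
import Mathlib
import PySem

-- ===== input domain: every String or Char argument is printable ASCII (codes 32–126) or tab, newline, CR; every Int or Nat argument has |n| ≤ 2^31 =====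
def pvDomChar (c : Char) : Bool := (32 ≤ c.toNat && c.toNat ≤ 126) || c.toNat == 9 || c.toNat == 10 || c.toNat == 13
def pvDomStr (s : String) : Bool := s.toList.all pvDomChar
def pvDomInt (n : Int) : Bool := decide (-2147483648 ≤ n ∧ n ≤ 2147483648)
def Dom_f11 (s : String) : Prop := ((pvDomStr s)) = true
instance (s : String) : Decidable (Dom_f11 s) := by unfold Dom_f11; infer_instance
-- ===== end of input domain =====

-- B replaces A's per-character prev/count state machine by a span scan that
-- slices out each maximal digit run at once (objective: simpler).
-- Both ports model the intermediate Python strings as their char lists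
-- (PySem convention: string operations are defined over List Char).

-- int(r, 2): exact for a nonempty run of '0'/'1' characters (all runs inside
-- Pre_f11); on other digit runs Python raises ValueError (excluded by Pre_f11).
def pvBin2 (r : List Char) : Int :=
  r.foldl (fun a c => 2 * a + (if c == '1' then 1 else 0)) 0

-- ===== PORT A =====
def f11 (s : String) : List Int :=
  -- state = (numericStr, prev, count)
  let st := s.toList.foldl
    (fun (st : List (List Char) × Bool × Int) i =>
      let (numericStr, prev, count) := st
      if PySem.Chars.isdigit i && prev then
        (numericStr ++ [[i]], false, count + 1)
      else if PySem.Chars.isdigit i && !prev then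
        -- numericStr[count] += i : whenever prev = false, count = len(numericStr)-1 ≥ 0,
        -- so the in-range item assignment is List.modify at count.toNat
        (numericStr.modify count.toNat (fun v => v ++ [i]), prev, count)
      else
        (numericStr, true, count))
    ([], true, -1)
  st.1.foldl
    (fun numeric i =>
      let num := pvBin2 i
      if PySem.Int.mod num 5 == 0 then numeric ++ [num] else numeric)
    []

-- ===== PORT B =====
-- the outer index scan: on a digit, the inner 'while j < n and s[j].isdigit()'
-- is takeWhile, the slice s[i:j] is the taken chars, and 'i = j' is dropWhile
def f11AltRuns : List Char → List (List Char)
  | [] => []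
  | c :: cs =>
    if PySem.Chars.isdigit c then
      ((c :: cs).takeWhile PySem.Chars.isdigit)
        :: f11AltRuns ((c :: cs).dropWhile PySem.Chars.isdigit)
    else
      f11AltRuns cs
termination_by l => l.length
decreasing_by
  · simp only [List.dropWhile]
    split
    · exact Nat.lt_succ_of_le (List.length_dropWhile_le _ _)
    · simp_all
  · simp

def f11_alt (s : String) : List Int :=
  let runs := f11AltRuns s.toList
  let nums := runs.map pvBin2
  nums.filter (fun m => PySem.Int.mod m 5 == 0)

-- ===== PRECONDITION & SPEC =====
-- Pre_f11 excludes exactly the inputs containing a digit other than '0'/'1'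
-- (i.e. some digit run is non-binary), on which int(run, 2) raises ValueError
-- in A and in B alike.
def Pre_f11 (s : String) : Prop :=
  (s.toList.all (fun c => !('2' ≤ c && c ≤ '9'))) = true
instance (s : String) : Decidable (Pre_f11 s) := by unfold Pre_f11; infer_instance

def pvWitness_f11 : String := "101 a 11 and 1010"

def Spec_f11 (s : String) (out : List Int) : Prop := out = f11_alt s
instance (s : String) (out : List Int) : Decidable (Spec_f11 s out) := by unfold Spec_f11; infer_instance

-- ===== CLAIM (what is proved, stated in full; the proofs are below) =====
def Claim_equal_f11 : Prop := ∀ (s : String), Dom_f11 s → Pre_f11 s → Spec_f11 s (f11 s)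

-- ===== LEMMAS AND PROOFS =====

-- A's loop body, named for the proofs
def pvStepA (st : List (List Char) × Bool × Int) (i : Char) : List (List Char) × Bool × Int :=
  let (numericStr, prev, count) := st
  if PySem.Chars.isdigit i && prev then
    (numericStr ++ [[i]], false, count + 1)
  else if PySem.Chars.isdigit i && !prev then
    (numericStr.modify count.toNat (fun v => v ++ [i]), prev, count)
  else
    (numericStr, true, count)

theorem pvModify_append_last (ns : List (List Char)) (r : List Char)
    (f : List Char → List Char) : (ns ++ [r]).modify ns.length f = ns ++ [f r] := by
  induction ns with
  | nil => simp [List.modify]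
  | cons a t ih => simpa [List.modify] using ih

-- joint invariant for A's loop vs B's run scan
theorem pvLoopA_main (n : Nat) : ∀ cs : List Char, cs.length ≤ n →
    (∀ (ns : List (List Char)) (count : Int), count = (ns.length : Int) - 1 →
      (cs.foldl pvStepA (ns, true, count)).1 = ns ++ f11AltRuns cs)
    ∧ (∀ (ns : List (List Char)) (r : List Char),
      (cs.foldl pvStepA (ns ++ [r], false, (ns.length : Int))).1
        = ns ++ [r ++ cs.takeWhile PySem.Chars.isdigit]
            ++ f11AltRuns (cs.dropWhile PySem.Chars.isdigit)) := by
  induction n with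
  | zero =>
    intro cs hcs
    have : cs = [] := List.eq_nil_of_length_eq_zero (Nat.le_zero.mp hcs)
    subst this
    exact ⟨fun ns count _ => by simp [f11AltRuns],
           fun ns r => by simp [f11AltRuns]⟩
  | succ n ih =>
    intro cs hcs
    cases cs with
    | nil =>
      exact ⟨fun ns count _ => by simp [f11AltRuns],
             fun ns r => by simp [f11AltRuns]⟩
    | cons c cs' =>
      have hlen : cs'.length ≤ n := Nat.lt_succ_iff.mp hcs
      by_cases hd : PySem.Chars.isdigit c = true
      · constructor
        · intro ns count hcount
          have hQ := (ih cs' hlen).2 ns [c]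
          have hcnt : count + 1 = (ns.length : Int) := by omega
          simp only [List.foldl_cons, pvStepA, hd, Bool.true_and, if_true, hcnt]
          rw [hQ]
          simp [f11AltRuns, hd, List.takeWhile, List.dropWhile]
        · intro ns r
          have hQ := (ih cs' hlen).2 ns (r ++ [c])
          have hmod := pvModify_append_last ns r (fun v => v ++ [c])
          simp only [List.foldl_cons, pvStepA, hd, Bool.true_and, Bool.not_false,
            Bool.and_false, Bool.false_eq_true, if_false, if_true,
            Int.toNat_natCast, hmod]
          rw [hQ]
          simp [List.takeWhile, List.dropWhile, hd]
      · have hstep : ∀ st : List (List Char) × Bool × Int,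
            pvStepA st c = (st.1, true, st.2.2) := by
          intro st; simp [pvStepA, hd]
        constructor
        · intro ns count hcount
          have hP := (ih cs' hlen).1 ns count hcount
          simp only [List.foldl_cons, hstep]
          rw [hP]; simp [f11AltRuns, hd]
        · intro ns r
          have hP := (ih cs' hlen).1 (ns ++ [r]) ((ns.length : Int)) (by simp)
          simp only [List.foldl_cons, hstep]
          rw [hP]
          simp [List.takeWhile, List.dropWhile, hd, f11AltRuns]

theorem pvPhase2 (ls : List (List Char)) (acc : List Int) :
    ls.foldl (fun numeric i =>
        let num := pvBin2 i
        if PySem.Int.mod num 5 == 0 then numeric ++ [num] else numeric) acc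
      = acc ++ (ls.map pvBin2).filter (fun m => PySem.Int.mod m 5 == 0) := by
  induction ls generalizing acc with
  | nil => simp
  | cons a t ih =>
    simp only [List.foldl_cons]
    rw [ih]
    by_cases h : (5 : Int) ∣ pvBin2 a <;> simp [h, List.filter_cons]

-- ===== VERDICT (by name: the statement is the Claim_ definition above) =====
theorem f11_spec : Claim_equal_f11 := by
  intro s _ _
  unfold Spec_f11 f11 f11_alt
  have h1 := (pvLoopA_main s.toList.length s.toList le_rfl).1 [] (-1) (by simp)
  have hfold : s.toList.foldl
      (fun (st : List (List Char) × Bool × Int) i =>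
        let (numericStr, prev, count) := st
        if PySem.Chars.isdigit i && prev then
          (numericStr ++ [[i]], false, count + 1)
        else if PySem.Chars.isdigit i && !prev then
          (numericStr.modify count.toNat (fun v => v ++ [i]), prev, count)
        else
          (numericStr, true, count))
      ([], true, -1) = s.toList.foldl pvStepA ([], true, -1) := rfl
  rw [hfold, pvPhase2, h1]
  simp
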